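-- pv_equiv track=rewrite | github.com/os-fpga/Backend | flowscripts/bitgen.py | expand_pattern
-- ===== SOURCE A (Python) =====
-- def expand_pattern(pattern):
--     """expand blif-style LHS patterns"""
--     idx = pattern.find('-')
--     if idx < 0:
--         yield pattern
--         return
--     (l, r) = (pattern[0:idx], pattern[idx+1:])
--     yield from expand_pattern(l + "0" + r)
--     yield from expand_pattern(l + "1" + r)
--     return
-- ===== SOURCE B (Python) =====
-- def expand_pattern(pattern):
--     """expand blif-style LHS patterns"""
--     # iterative product-style expansion: every '-' position doubles the
--     # current result list in place (leftmost dash most significant)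
--     results = [pattern]
--     for i, ch in enumerate(pattern):
--         if ch == '-':
--             results = [r[:i] + b + r[i+1:] for r in results for b in "01"]
--     yield from results
-- ===== Notes on version B (the rewrite author's own statement) =====
-- stated objective: alternative
-- what changed: Replaced A's recursive split-at-first-dash expansion by a single iterative pass over the pattern's positions that doubles a running result list at every dash character (product-style expansion), preserving the leftmost-dash-most-significant order; both remain generators.
import Mathlib
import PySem

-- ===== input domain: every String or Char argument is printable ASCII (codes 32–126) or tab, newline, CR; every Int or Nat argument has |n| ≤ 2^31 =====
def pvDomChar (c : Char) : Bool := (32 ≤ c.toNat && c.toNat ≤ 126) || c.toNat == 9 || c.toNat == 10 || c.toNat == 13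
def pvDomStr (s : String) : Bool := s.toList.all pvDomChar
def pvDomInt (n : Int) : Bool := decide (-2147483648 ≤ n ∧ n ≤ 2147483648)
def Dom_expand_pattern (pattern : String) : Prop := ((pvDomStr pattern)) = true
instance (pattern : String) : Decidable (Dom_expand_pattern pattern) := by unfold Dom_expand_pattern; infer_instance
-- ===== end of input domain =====

-- B replaces A's recursive first-dash splitting by one iterative pass that doubles a
-- result list at every '-' position (objective: alternative decomposition, same cost).
-- Both the Python A (a generator) and B yield the same sequence; the ports return it as a list.

-- ===== PORT A =====
-- termination helper: a non-negative find result decomposes the string at its first '-'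
theorem pv_find_decomp (cs : List Char) (h : ¬ PySem.Chars.find cs ['-'] < 0) :
    ∃ t d, cs = t ++ '-' :: d ∧ '-' ∉ t ∧ (t.length : Int) = PySem.Chars.find cs ['-'] := by
  have hne : PySem.Chars.findFrom cs ['-'] ((0 : Nat) : Int) ≠ -1 := by
    rw [Nat.cast_zero, PySem.Chars.findFrom_zero]; omega
  obtain ⟨-, hpre, hmin⟩ := PySem.Chars.findFrom_natCast_spec cs ['-'] 0 (Nat.zero_le _) hne
  rw [Nat.cast_zero, PySem.Chars.findFrom_zero] at hpre hmin
  set f := PySem.Chars.find cs ['-'] with hf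
  have hlen : f ≤ (cs.length : Int) := PySem.Chars.find_le_length cs ['-']
  refine ⟨cs.take f.toNat, cs.drop (f.toNat + 1), ?_, ?_, ?_⟩
  · obtain ⟨u, hu⟩ := hpre
    have hu1 : cs.drop (f.toNat + 1) = u := by
      rw [← List.drop_drop, ← hu]
      rfl
    conv_lhs => rw [← List.take_append_drop f.toNat cs]
    rw [← hu, hu1]
    rfl
  · intro hmem
    obtain ⟨i, hi, hci⟩ := List.mem_iff_getElem.mp hmem
    have hilt : i < f.toNat := lt_of_lt_of_le hi (by simp)
    refine hmin i (Nat.zero_le _) hilt ⟨cs.drop (i + 1), ?_⟩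
    have : cs.drop i = cs[i]'(by omega) :: cs.drop (i + 1) := List.drop_eq_getElem_cons (by omega)
    rw [this]
    simp only [List.getElem_take] at hci
    simp [hci]
  · rw [List.length_take]
    omega

-- dash count decreases when the first '-' is replaced by b ≠ '-'
theorem pv_count_lt (cs : List Char) (h : ¬ PySem.Chars.find cs ['-'] < 0) (b : Char) (hb : b ≠ '-') :
    (PySem.List.slice cs (some 0) (some (PySem.Chars.find cs ['-'])) ++ [b] ++
      PySem.List.slice cs (some (PySem.Chars.find cs ['-'] + 1)) none).count '-' < cs.count '-' := by
  obtain ⟨t, d, hcs, ht, hlen⟩ := pv_find_decomp cs h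
  rw [← hlen, PySem.List.slice_zero_start, PySem.List.slice_to_natCast,
      (by push_cast; ring : (t.length : Int) + 1 = ((t.length + 1 : Nat) : Int)),
      PySem.List.slice_from_natCast, hcs]
  have htake : (t ++ '-' :: d).take t.length = t := by simp
  have hdrop : (t ++ '-' :: d).drop (t.length + 1) = d := by
    rw [show t ++ '-' :: d = (t ++ ['-']) ++ d from by simp,
        show t.length + 1 = (t ++ ['-']).length from by simp, List.drop_left]
  rw [htake, hdrop]
  have h0 : t.count '-' = 0 := List.count_eq_zero.mpr ht
  simp [List.count_append, h0, hb]

-- literal transliteration of A: recursion on the first '-' (on the code-point list; PySem strings are List Char)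
def expand_pattern_core (cs : List Char) : List (List Char) :=
  if h : PySem.Chars.find cs ['-'] < 0 then [cs]
  else
    expand_pattern_core (PySem.List.slice cs (some 0) (some (PySem.Chars.find cs ['-'])) ++ ['0'] ++
        PySem.List.slice cs (some (PySem.Chars.find cs ['-'] + 1)) none) ++
    expand_pattern_core (PySem.List.slice cs (some 0) (some (PySem.Chars.find cs ['-'])) ++ ['1'] ++
        PySem.List.slice cs (some (PySem.Chars.find cs ['-'] + 1)) none)
termination_by cs.count '-'
decreasing_by
  · exact pv_count_lt cs h '0' (by decide)
  · exact pv_count_lt cs h '1' (by decide)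

def expand_pattern (pattern : String) : List String :=
  (expand_pattern_core pattern.toList).map String.ofList

-- ===== PORT B =====
-- literal transliteration of Source B: one fold over enumerate(pattern); each '-' position doubles the results
def expand_pattern_alt_core (cs : List Char) : List (List Char) :=
  (PySem.List.enumerate cs).foldl
    (fun results p =>
      if p.2 = '-' then
        results.flatMap (fun r => ['0', '1'].map (fun b =>
          PySem.List.slice r none (some p.1) ++ [b] ++ PySem.List.slice r (some (p.1 + 1)) none))
      else results)
    [cs]

def expand_pattern_alt (pattern : String) : List String :=
  (expand_pattern_alt_core pattern.toList).map String.ofList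

-- ===== PRECONDITION & SPEC =====
def Spec_expand_pattern (pattern : String) (out : List String) : Prop := out = expand_pattern_alt pattern
instance (pattern : String) (out : List String) : Decidable (Spec_expand_pattern pattern out) := by unfold Spec_expand_pattern; infer_instance

-- ===== CLAIM (what is proved, stated in full; the proofs are below) =====
def Claim_equal_expand_pattern : Prop := ∀ (pattern : String), Dom_expand_pattern pattern → Spec_expand_pattern pattern (expand_pattern pattern)

-- ===== LEMMAS AND PROOFS =====

-- B's doubling step, named for the proofs
def pvStep (results : List (List Char)) (p : Int × Char) : List (List Char) :=
  results.flatMap (fun r => ['0', '1'].map (fun b =>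
    PySem.List.slice r none (some p.1) ++ [b] ++ PySem.List.slice r (some (p.1 + 1)) none))

-- the dash positions B actually acts on
def pvDashes (cs : List Char) (s : Int) : List (Int × Char) :=
  (PySem.List.enumerate cs s).filter (fun p => decide (p.2 = '-'))

theorem pv_alt_core_eq (cs : List Char) :
    expand_pattern_alt_core cs = (pvDashes cs 0).foldl pvStep [cs] := by
  unfold expand_pattern_alt_core pvDashes pvStep
  exact PySem.List.foldl_ite_eq_foldl_filter (fun q : Int × Char => q.2 = '-')
    (fun results q => results.flatMap (fun r => ['0', '1'].map (fun b =>
      PySem.List.slice r none (some q.1) ++ [b] ++ PySem.List.slice r (some (q.1 + 1)) none)))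
    (PySem.List.enumerate cs) [cs]

theorem pv_foldl_step_append (l : List (Int × Char)) (r1 r2 : List (List Char)) :
    l.foldl pvStep (r1 ++ r2) = l.foldl pvStep r1 ++ l.foldl pvStep r2 := by
  induction l generalizing r1 r2 with
  | nil => simp
  | cons p l ih =>
    simp only [List.foldl_cons]
    rw [(by simp [pvStep] : pvStep (r1 ++ r2) p = pvStep r1 p ++ pvStep r2 p), ih]

theorem pv_dashes_nil (cs : List Char) : ∀ (s : Int), '-' ∉ cs → pvDashes cs s = [] := by
  induction cs with
  | nil => intro s _; rfl
  | cons c cs ih =>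
    intro s h
    simp only [List.mem_cons, not_or] at h
    unfold pvDashes at *
    simp only [PySem.List.enumerate, List.filter_cons]
    rw [if_neg (by simpa using Ne.symm h.1)]
    exact ih (s + 1) h.2

theorem pv_dashes_append (xs ys : List Char) (s : Int) :
    pvDashes (xs ++ ys) s = pvDashes xs s ++ pvDashes ys (s + xs.length) := by
  unfold pvDashes
  rw [PySem.List.enumerate_append, List.filter_append]

-- core equivalence: A's recursion computes B's fold
theorem pv_core_eq (cs : List Char) : expand_pattern_core cs = expand_pattern_alt_core cs := by
  induction cs using expand_pattern_core.induct with
  | case1 cs h =>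
    have hm : '-' ∉ cs := by
      have h1 : PySem.Chars.find cs ['-'] = -1 := le_antisymm (by omega) (PySem.Chars.neg_one_le_find cs ['-'])
      have h2 := (PySem.Chars.find_eq_neg_one_iff cs ['-']).mp h1
      intro hc
      obtain ⟨u, v, huv⟩ := List.append_of_mem hc
      exact h2 ⟨u, v, by rw [huv]; simp⟩
    rw [expand_pattern_core, dif_pos h, pv_alt_core_eq, pv_dashes_nil cs 0 hm]
    rfl
  | case2 cs h ih0 ih1 =>
    obtain ⟨t, d, hcs, ht, hlen⟩ := pv_find_decomp cs h
    have hslice : ∀ b : Char,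
        PySem.List.slice cs (some 0) (some (PySem.Chars.find cs ['-'])) ++ [b] ++
          PySem.List.slice cs (some (PySem.Chars.find cs ['-'] + 1)) none = t ++ b :: d := by
      intro b
      rw [← hlen, PySem.List.slice_zero_start, PySem.List.slice_to_natCast,
          (by push_cast; ring : (t.length : Int) + 1 = ((t.length + 1 : Nat) : Int)),
          PySem.List.slice_from_natCast, hcs]
      have hdrop : (t ++ '-' :: d).drop (t.length + 1) = d := by
        rw [show t ++ '-' :: d = (t ++ ['-']) ++ d from by simp,
            show t.length + 1 = (t ++ ['-']).length from by simp, List.drop_left]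
      simp [hdrop]
    -- the dash lists of cs and of its two substitutions
    have hD : ∀ b : Char, b ≠ '-' →
        pvDashes (t ++ b :: d) 0 = pvDashes d ((t.length : Int) + 1) := by
      intro b hb
      rw [pv_dashes_append, pv_dashes_nil t 0 ht]
      unfold pvDashes
      simp only [PySem.List.enumerate, List.filter_cons]
      rw [if_neg (by simpa using hb)]
      simp [add_comm]
    have hDcs : pvDashes cs 0 = ((t.length : Int), '-') :: pvDashes d ((t.length : Int) + 1) := by
      rw [hcs, pv_dashes_append, pv_dashes_nil t 0 ht]
      unfold pvDashes
      simp only [PySem.List.enumerate, List.filter_cons]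
      rw [if_pos (by simp)]
      simp [add_comm]
    -- B's first doubling step on [cs]
    have hstep : pvStep [cs] ((t.length : Int), '-') = [t ++ '0' :: d] ++ [t ++ '1' :: d] := by
      unfold pvStep
      have hdrop : cs.drop (t.length + 1) = d := by
        rw [hcs, show t ++ '-' :: d = (t ++ ['-']) ++ d from by simp,
            show t.length + 1 = (t ++ ['-']).length from by simp, List.drop_left]
      have htake : cs.take t.length = t := by rw [hcs]; simp
      rw [List.flatMap_singleton]
      simp only [PySem.List.slice_to_natCast,
        (by push_cast; ring : (t.length : Int) + 1 = ((t.length + 1 : Nat) : Int)),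
        PySem.List.slice_from_natCast, htake, hdrop]
      simp
    rw [expand_pattern_core, dif_neg h, ih0, ih1]
    rw [pv_alt_core_eq, pv_alt_core_eq, pv_alt_core_eq, hslice '0', hslice '1',
        hD '0' (by decide), hD '1' (by decide), hDcs]
    rw [List.foldl_cons, hstep, pv_foldl_step_append]

-- ===== VERDICT (by name: the statement is the Claim_ definition above) =====
theorem expand_pattern_spec : Claim_equal_expand_pattern := by
  intro pattern _
  unfold Spec_expand_pattern expand_pattern expand_pattern_alt
  rw [pv_core_eq]
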